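-- pv_equiv track=rewrite | github.com/b-mcswiney/web-services-and-data | cwk2/list.py | get_conjunctive
-- ===== SOURCE A (Python) =====
-- def get_conjunctive(terms: list, index: dict):
--     conjunctive_list = {}
--     terms_docs = []
--
--     for term in terms:
--         term_data = []
--         for doc in index[term]:
--             term_data.append(doc["doc-id"])
--         terms_docs.append(term_data)
--
--     conjunctive_list = set(terms_docs[0]).intersection(*terms_docs)
--
--     return conjunctive_list
-- ===== SOURCE B (Python) =====
-- def get_conjunctive(terms: list, index: dict):
--     # Counting algorithm: a doc-id is in the conjunction iff it occurs in the
--     # postings of all len(terms) terms.  Concatenate each term's doc-ids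
--     # (de-duplicated per term), count occurrences, keep ids whose count == len(terms).
--     n = len(terms)
--     all_ids = []
--     for term in terms:
--         all_ids.extend(dict.fromkeys(doc["doc-id"] for doc in index[term]))
--     counts = {}
--     for i in all_ids:
--         counts[i] = counts.get(i, 0) + 1
--     return {i for i, c in counts.items() if c == n}
-- ===== Notes on version B (the rewrite author's own statement) =====
-- stated objective: alternative
-- what changed: Replaces A's per-term list materialization plus one multi-way set.intersection with a counting algorithm: concatenate each term's de-duplicated doc-ids, tally occurrences in a dict, and keep the ids whose count equals the number of terms.
import Mathlib
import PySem

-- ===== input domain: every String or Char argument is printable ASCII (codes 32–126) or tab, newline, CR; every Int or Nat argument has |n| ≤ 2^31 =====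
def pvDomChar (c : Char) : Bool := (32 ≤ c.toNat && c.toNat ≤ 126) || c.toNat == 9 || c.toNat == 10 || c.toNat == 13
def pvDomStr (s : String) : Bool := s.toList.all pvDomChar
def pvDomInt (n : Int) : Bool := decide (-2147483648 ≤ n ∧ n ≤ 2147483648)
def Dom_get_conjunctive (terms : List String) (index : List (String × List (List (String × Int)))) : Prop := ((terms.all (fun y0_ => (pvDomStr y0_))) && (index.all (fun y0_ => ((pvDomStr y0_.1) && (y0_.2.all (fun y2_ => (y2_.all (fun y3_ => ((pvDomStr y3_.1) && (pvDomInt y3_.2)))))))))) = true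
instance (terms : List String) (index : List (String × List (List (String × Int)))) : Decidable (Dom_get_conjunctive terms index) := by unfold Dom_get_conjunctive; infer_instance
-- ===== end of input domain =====

-- B replaces A's "materialize every per-term doc-id list, then one multi-way set
-- intersection" with a counting algorithm: concatenate the per-term de-duplicated
-- doc-ids, tally them in a dict, keep ids whose count equals len(terms)
-- (objective: alternative).  The Python return value is a set; the Lean ports are
-- proved equal as insertion-ordered element lists, stronger than set equality.

-- ===== PORT A =====
-- doc["doc-id"]; total form of the lookup — Pre_ guarantees the key is present
def pvDocId (doc : List (String × Int)) : Int := (PySem.Dict.mk doc).getD "doc-id" 0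

def get_conjunctive (terms : List String) (index : List (String × List (List (String × Int)))) : List Int :=
  -- for term in terms: term_data = [doc["doc-id"] for doc in index[term]]; terms_docs.append(term_data)
  let terms_docs : List (List Int) := terms.foldl (fun td term =>
    let term_data : List Int :=
      ((PySem.Dict.mk index).getD term []).foldl (fun acc doc => acc ++ [pvDocId doc]) []
    td ++ [term_data]) []
  -- set(terms_docs[0]).intersection(*terms_docs); terms_docs[0] raises IndexError iff terms = [] (excluded by Pre_)
  let first : List Int := (PySem.List.pyGet? terms_docs 0).getD []
  terms_docs.foldl (fun s td => PySem.Set.inter s td) (PySem.Set.ofList first)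

-- ===== PORT B =====
def get_conjunctive_alt (terms : List String) (index : List (String × List (List (String × Int)))) : List Int :=
  -- n = len(terms)
  let n : Int := (terms.length : Int)
  -- for term in terms: all_ids.extend(dict.fromkeys(doc["doc-id"] for doc in index[term]))
  let all_ids : List Int := terms.foldl (fun acc term =>
    acc ++ PySem.List.dedup (((PySem.Dict.mk index).getD term []).map pvDocId)) []
  -- for i in all_ids: counts[i] = counts.get(i, 0) + 1
  let counts : PySem.Dict Int Int :=
    all_ids.foldl (fun d i => d.insert i (d.getD i 0 + 1)) PySem.Dict.empty
  -- {i for i, c in counts.items() if c == n}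
  PySem.Set.ofList ((counts.items.filter (fun p => p.2 == n)).map (·.1))

-- ===== PRECONDITION & SPEC =====
-- Pre_ excludes exactly the inputs where the Python A raises: empty terms (IndexError on
-- terms_docs[0]), a term missing from the index (KeyError) or a doc without "doc-id" (KeyError).
def Pre_get_conjunctive (terms : List String) (index : List (String × List (List (String × Int)))) : Prop :=
  terms ≠ [] ∧ ∀ t ∈ terms, (PySem.Dict.mk index).contains t = true ∧
    ∀ doc ∈ (PySem.Dict.mk index).getD t [], (PySem.Dict.mk doc).contains "doc-id" = true
instance (terms : List String) (index : List (String × List (List (String × Int)))) : Decidable (Pre_get_conjunctive terms index) := by unfold Pre_get_conjunctive; infer_instance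

def pvWitness_get_conjunctive : List String × (List (String × List (List (String × Int)))) :=
  (["a"], [("a", [[("doc-id", 1)]]), ("b", [[("doc-id", 2)]])])

def Spec_get_conjunctive (terms : List String) (index : List (String × List (List (String × Int)))) (out : List Int) : Prop := out = get_conjunctive_alt terms index
instance (terms : List String) (index : List (String × List (List (String × Int)))) (out : List Int) : Decidable (Spec_get_conjunctive terms index out) := by unfold Spec_get_conjunctive; infer_instance

-- ===== CLAIM (what is proved, stated in full; the proofs are below) =====
def Claim_equal_get_conjunctive : Prop := ∀ (terms : List String) (index : List (String × List (List (String × Int)))), Dom_get_conjunctive terms index → Pre_get_conjunctive terms index → Spec_get_conjunctive terms index (get_conjunctive terms index)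

-- ===== LEMMAS AND PROOFS =====

-- per-term doc-id list
def pvIds (index : List (String × List (List (String × Int)))) (t : String) : List Int :=
  ((PySem.Dict.mk index).getD t []).map pvDocId

-- A's fold of intersections is a filter by membership in every list
theorem pv_foldl_inter (L : List (List Int)) (s : List Int) :
    L.foldl (fun acc l => PySem.Set.inter acc l) s
      = s.filter (fun x => decide (∀ l ∈ L, x ∈ l)) := by
  induction L generalizing s with
  | nil => simp
  | cons l L ih =>
    rw [List.foldl_cons, ih]
    show (List.filter _ s).filter _ = _
    rw [List.filter_filter]
    apply List.filter_congr
    intro x _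
    simp [Bool.and_comm]

-- count of x in B's concatenation = number of terms whose postings contain x
theorem pv_count_all_ids (index : List (String × List (List (String × Int)))) (terms : List String) (x : Int) :
    (terms.flatMap (fun t => PySem.List.dedup (pvIds index t))).count x
      = terms.countP (fun t => decide (x ∈ pvIds index t)) := by
  induction terms with
  | nil => simp
  | cons t ts ih =>
    rw [List.flatMap_cons, List.count_append, ih, List.countP_cons]
    have hnd := PySem.List.nodup_dedup (pvIds index t)
    by_cases hx : x ∈ pvIds index t
    · rw [List.count_eq_one_of_mem hnd (by simpa [PySem.List.mem_dedup] using hx)]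
      simp [hx]; omega
    · rw [List.count_eq_zero_of_not_mem (by simpa [PySem.List.mem_dedup] using hx)]
      simp [hx]

-- count == len(terms) says exactly "x is in every term's postings"
theorem pv_count_eq_length_iff (index : List (String × List (List (String × Int)))) (terms : List String) (x : Int) :
    (((terms.flatMap (fun t => PySem.List.dedup (pvIds index t))).count x : Int) = (terms.length : Int))
      ↔ (∀ t ∈ terms, x ∈ pvIds index t) := by
  rw [pv_count_all_ids]
  rw [show ((terms.length : Int)) = ((terms.length : Nat) : Int) from rfl, Int.natCast_inj]
  rw [List.countP_eq_length]
  simp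

-- B's filter predicate "count == len(terms)" is canon's "in every term's postings"
theorem pv_filter_pred (index : List (String × List (List (String × Int)))) (terms : List String) (x : Int) :
    (((terms.flatMap (fun t => PySem.List.dedup (pvIds index t))).count x : Int) == (terms.length : Int))
      = decide (∀ t ∈ terms, x ∈ pvIds index t) := by
  rw [show ∀ a b : Int, (a == b) = decide (a = b) from fun _ _ => rfl]
  simp only [decide_eq_decide]
  exact pv_count_eq_length_iff index terms x

-- filtering set(L0 ++ R) by a predicate that implies membership in L0 ignores R
theorem pv_ofList_append_filter (L0 R : List Int) (p : Int → Bool) (h : ∀ x, p x = true → x ∈ L0) :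
    (PySem.Set.ofList (L0 ++ R)).filter p = (PySem.Set.ofList L0).filter p := by
  rw [PySem.Set.ofList_append, PySem.Set.update_eq_append_filter, List.filter_append]
  rw [show List.filter p (List.filter (fun y => !PySem.Set.contains (PySem.Set.ofList L0) y) (PySem.Set.ofList R)) = [] from ?_, List.append_nil]
  rw [List.filter_eq_nil_iff]
  intro x hx
  simp only [List.mem_filter, Bool.not_eq_eq_eq_not, Bool.not_true] at hx
  intro hp
  have hmem : x ∈ PySem.Set.ofList L0 := (PySem.Set.mem_ofList L0 x).mpr (h x hp)
  rw [← PySem.Set.contains_iff] at hmem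
  rw [hx.2] at hmem
  exact Bool.false_ne_true hmem

-- the canonical value both programs compute
def pvCanon (index : List (String × List (List (String × Int)))) (t0 : String) (rest : List String) : List Int :=
  (PySem.Set.ofList (pvIds index t0)).filter (fun x => decide (∀ t ∈ t0 :: rest, x ∈ pvIds index t))

theorem pv_A_eq (index : List (String × List (List (String × Int)))) (t0 : String) (rest : List String) :
    get_conjunctive (t0 :: rest) index = pvCanon index t0 rest := by
  unfold get_conjunctive pvCanon
  have hin : ∀ t, ((PySem.Dict.mk index).getD t []).foldl (fun acc doc => acc ++ [pvDocId doc]) []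
      = pvIds index t := by
    intro t; rw [PySem.List.foldl_append_singleton_eq_map]; simp [pvIds]
  simp only [PySem.List.foldl_append_singleton_eq_map, List.nil_append, hin]
  rw [show (0 : Int) = ((0 : Nat) : Int) from rfl, PySem.List.pyGet?_natCast]
  simp only [List.map_cons, List.getElem?_cons_zero, Option.getD_some]
  rw [pv_foldl_inter]
  apply List.filter_congr
  intro x _
  simp

theorem pv_B_eq (index : List (String × List (List (String × Int)))) (t0 : String) (rest : List String) :
    get_conjunctive_alt (t0 :: rest) index = pvCanon index t0 rest := by
  unfold get_conjunctive_alt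
  simp only [PySem.List.foldl_append_eq_flatMap, List.nil_append,
    PySem.Dict.foldl_insert_getD_add_one_eq_counter, PySem.Dict.items_counter,
    List.filter_map, List.map_map, Function.comp_def]
  simp only [show ∀ t, List.map pvDocId ((PySem.Dict.mk index).getD t []) = pvIds index t from fun _ => rfl]
  rw [List.map_id']
  rw [List.filter_congr (fun x _ => pv_filter_pred index (t0 :: rest) x)]
  rw [PySem.Set.ofList_eq_self_of_nodup _ (List.Nodup.filter _ (PySem.Set.nodup_ofList _))]
  rw [List.flatMap_cons]
  rw [pv_ofList_append_filter _ _ _ (fun x hx => by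
    simp only [decide_eq_true_eq] at hx
    simpa [PySem.List.mem_dedup] using hx t0 List.mem_cons_self)]
  rw [PySem.List.dedup_eq_ofList, PySem.Set.ofList_ofList]
  rfl

-- ===== VERDICT (by name: the statement is the Claim_ definition above) =====
theorem get_conjunctive_spec : Claim_equal_get_conjunctive := by
  intro terms index _ hpre
  unfold Spec_get_conjunctive
  obtain ⟨hne, -⟩ := hpre
  match terms with
  | [] => exact absurd rfl hne
  | t0 :: rest => rw [pv_A_eq, pv_B_eq]
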